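-- pv_equiv track=rewrite | github.com/MKAbuMattar/igntui | src/igntui/core/api/client.py | _is_valid_template_name
-- ===== SOURCE A (Python) =====
-- def _is_valid_template_name(name: str) -> bool:
--     if not name or len(name) > 100:
--         return False
--
--     if not any(c.isalnum() for c in name):
--         return False
--
--     suspicious_patterns = ["..", "//", "\\\\", "<", ">", "|"]
--     if any(pattern in name for pattern in suspicious_patterns):
--         return False
--
--     return True
-- ===== SOURCE B (Python) =====
-- def _is_valid_template_name(name: str) -> bool:
--     if not name or len(name) > 100:
--         return False
--     has_alnum = False
--     prev = None
--     for c in name: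
--         if c.isalnum():
--             has_alnum = True
--         if c in "<>|":
--             return False
--         if prev == c and c in "./\\":
--             return False
--         prev = c
--     return has_alnum
-- ===== Notes on version B (the rewrite author's own statement) =====
-- stated objective: alternative
-- what changed: Replaces the three independent scans (any-isalnum pass plus six substring searches) by one single pass that tracks a has_alnum flag and the previous character, rejecting on <, >, | or a doubled ., /, \ immediately.
import Mathlib
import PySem

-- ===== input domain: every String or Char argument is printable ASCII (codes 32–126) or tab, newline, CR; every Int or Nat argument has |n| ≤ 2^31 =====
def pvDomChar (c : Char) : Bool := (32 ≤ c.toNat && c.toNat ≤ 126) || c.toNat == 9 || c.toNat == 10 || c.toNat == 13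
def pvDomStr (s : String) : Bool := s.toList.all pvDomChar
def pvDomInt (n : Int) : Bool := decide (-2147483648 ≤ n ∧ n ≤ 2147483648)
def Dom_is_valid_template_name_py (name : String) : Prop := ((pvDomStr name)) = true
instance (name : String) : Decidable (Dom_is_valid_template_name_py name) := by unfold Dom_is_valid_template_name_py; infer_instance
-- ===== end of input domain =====

-- B replaces A's three independent scans (any-isalnum pass plus six substring searches)
-- by one single pass tracking a has_alnum flag and the previous character (objective: alternative).

-- ===== PORT A =====
def is_valid_template_name_py (name : String) : Bool :=
  if PySem.Str.len name == 0 || PySem.Str.len name > 100 then false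
  else if !(name.toList.any (fun c => PySem.Chars.isalnum c)) then false
  else if ["..", "//", "\\\\", "<", ">", "|"].any (fun p => PySem.Str.isIn p name) then false
  else true

-- ===== PORT B =====
-- the for-loop of Source B: state = (previous character, has_alnum flag)
def pvAltLoop : List Char → Option Char → Bool → Bool
  | [], _, hasAlnum => hasAlnum
  | c :: rest, prev, hasAlnum =>
    let h' := hasAlnum || PySem.Chars.isalnum c
    if c == '<' || c == '>' || c == '|' then false
    else if prev == some c && (c == '.' || c == '/' || c == '\\') then false
    else pvAltLoop rest (some c) h'

def is_valid_template_name_py_alt (name : String) : Bool :=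
  if PySem.Str.len name == 0 || PySem.Str.len name > 100 then false
  else pvAltLoop name.toList none false

-- ===== PRECONDITION & SPEC =====
def Spec_is_valid_template_name_py (name : String) (out : Bool) : Prop := out = is_valid_template_name_py_alt name
instance (name : String) (out : Bool) : Decidable (Spec_is_valid_template_name_py name out) := by unfold Spec_is_valid_template_name_py; infer_instance

-- ===== CLAIM (what is proved, stated in full; the proofs are below) =====
def Claim_equal_is_valid_template_name_py : Prop := ∀ (name : String), Dom_is_valid_template_name_py name → Spec_is_valid_template_name_py name (is_valid_template_name_py name)

-- ===== LEMMAS AND PROOFS =====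

-- boolean "no suspicious character/pair yet" check in the same left-to-right order as pvAltLoop
def pvClean : List Char → Option Char → Bool
  | [], _ => true
  | c :: rest, prev =>
    if c == '<' || c == '>' || c == '|' then false
    else if prev == some c && (c == '.' || c == '/' || c == '\\') then false
    else pvClean rest (some c)

lemma pvAltLoop_eq (l : List Char) (prev : Option Char) (h : Bool) :
    pvAltLoop l prev h = ((h || l.any (fun c => PySem.Chars.isalnum c)) && pvClean l prev) := by
  induction l generalizing prev h with
  | nil => simp [pvAltLoop, pvClean]
  | cons c rest ih =>
    simp only [pvAltLoop, pvClean, List.any_cons]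
    split_ifs with h1 h2
    · simp
    · simp
    · rw [ih]
      cases h <;> cases PySem.Chars.isalnum c <;> simp [Bool.or_comm]

def pvBadp (c : Char) : Prop := c = '.' ∨ c = '/' ∨ c = '\\'

def pvR (a b : Char) : Prop := ¬(a = b ∧ pvBadp b)

lemma pvClean_iff (l : List Char) (prev : Option Char) :
    pvClean l prev = true ↔
      ((∀ c ∈ l, ¬(c = '<' ∨ c = '>' ∨ c = '|')) ∧ List.IsChain pvR (prev.toList ++ l)) := by
  induction l generalizing prev with
  | nil =>
    cases prev <;> simp [pvClean]
  | cons c rest ih =>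
    simp only [pvClean]
    split_ifs with h1 h2
    · simp only [false_iff]
      intro ⟨hall, _⟩
      exact hall c (List.mem_cons_self ..) (by
        simp only [Bool.or_eq_true, beq_iff_eq] at h1
        tauto)
    · simp only [false_iff]
      intro ⟨_, hch⟩
      simp only [Bool.and_eq_true, Bool.or_eq_true, beq_iff_eq] at h2
      obtain ⟨hp, hc⟩ := h2
      cases prev with
      | none => simp at hp
      | some p =>
        simp only [Option.some.injEq] at hp
        subst hp
        simp only [Option.toList, List.cons_append, List.nil_append,
          List.isChain_cons_cons] at hch
        exact hch.1 ⟨rfl, by unfold pvBadp; tauto⟩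
    · rw [ih (some c)]
      simp only [Bool.or_eq_true, beq_iff_eq, Bool.and_eq_true] at h1 h2
      have hc1 : ¬(c = '<' ∨ c = '>' ∨ c = '|') := fun h => h1 (by tauto)
      cases prev with
      | none =>
        simp only [Option.toList, List.nil_append, List.forall_mem_cons]
        tauto
      | some p =>
        have hpc : pvR p c := by
          rintro ⟨rfl, hb⟩
          exact h2 ⟨rfl, by unfold pvBadp at hb; tauto⟩
        simp only [Option.toList, List.cons_append, List.nil_append,
          List.isChain_cons_cons, List.forall_mem_cons]
        tauto

lemma pvSingle_infix {a : Char} {l : List Char} : [a] <:+: l ↔ a ∈ l := by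
  constructor
  · intro h
    exact h.sublist.subset (List.mem_singleton_self a)
  · intro h
    obtain ⟨s, t, rfl⟩ := List.append_of_mem h
    exact ⟨s, t, by simp⟩

lemma pvPair_prefix {a x : Char} {l : List Char} :
    [a, a] <+: x :: l ↔ x = a ∧ l.head? = some a := by
  cases l with
  | nil => simp [List.cons_prefix_cons]
  | cons z t => simp [List.cons_prefix_cons, eq_comm, and_comm]

lemma pvChain_iff (l : List Char) :
    List.IsChain pvR l ↔ ∀ a : Char, pvBadp a → ¬([a, a] <:+: l) := by
  induction l with
  | nil => simp
  | cons x l ih =>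
    rw [List.isChain_cons]
    constructor
    · rintro ⟨hhd, hch⟩ a hb hinf
      rcases List.infix_cons_iff.1 hinf with hpre | hinf
      · obtain ⟨hxa, hh⟩ := pvPair_prefix.1 hpre
        exact hhd a (by simp [hh]) ⟨hxa, hb⟩
      · exact (ih.1 hch) a hb hinf
    · intro h
      refine ⟨?_, ih.2 fun a hb hinf => h a hb ?_⟩
      · intro y hy
        rintro ⟨hxy, hb⟩
        cases l with
        | nil => simp at hy
        | cons z t =>
          simp only [List.head?_cons, Option.mem_def, Option.some.injEq] at hy
          exact h y hb ⟨[], t, by simp [hxy, hy]⟩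
      · obtain ⟨s, t, rfl⟩ := hinf
        exact ⟨x :: s, t, by simp⟩

lemma pvClean_none_iff (l : List Char) :
    pvClean l none = true ↔
      ¬(['.', '.'] <:+: l ∨ ['/', '/'] <:+: l ∨ ['\\', '\\'] <:+: l ∨
        '<' ∈ l ∨ '>' ∈ l ∨ '|' ∈ l) := by
  rw [pvClean_iff, pvChain_iff]
  simp only [Option.toList, List.nil_append]
  constructor
  · rintro ⟨hall, hch⟩ (h | h | h | h | h | h)
    · exact hch '.' (Or.inl rfl) h
    · exact hch '/' (Or.inr (Or.inl rfl)) h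
    · exact hch '\\' (Or.inr (Or.inr rfl)) h
    · exact hall _ h (Or.inl rfl)
    · exact hall _ h (Or.inr (Or.inl rfl))
    · exact hall _ h (Or.inr (Or.inr rfl))
  · intro h
    refine ⟨fun c hc hbad => h ?_, fun a hb hinf => h ?_⟩
    · rcases hbad with rfl | rfl | rfl <;> tauto
    · rcases hb with rfl | rfl | rfl <;> tauto

lemma pvPatterns_eq (name : String) :
    (["..", "//", "\\\\", "<", ">", "|"].any (fun p => PySem.Str.isIn p name)) =
      !(pvClean name.toList none) := by
  have e1 : (String.toList "..") = ['.', '.'] := by decide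
  have e2 : (String.toList "//") = ['/', '/'] := by decide
  have e3 : (String.toList "\\\\") = ['\\', '\\'] := by decide
  have e4 : (String.toList "<") = ['<'] := by decide
  have e5 : (String.toList ">") = ['>'] := by decide
  have e6 : (String.toList "|") = ['|'] := by decide
  cases hc : pvClean name.toList none with
  | true =>
    have h6 := (pvClean_none_iff name.toList).1 hc
    simp only [Bool.not_true]
    rw [List.any_eq_false]
    intro p hp hin
    rw [PySem.Str.isIn_iff_infix] at hin
    rcases List.mem_cons.1 hp with rfl | hp
    · exact h6 (Or.inl (e1 ▸ hin))
    rcases List.mem_cons.1 hp with rfl | hp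
    · exact h6 (Or.inr (Or.inl (e2 ▸ hin)))
    rcases List.mem_cons.1 hp with rfl | hp
    · exact h6 (Or.inr (Or.inr (Or.inl (e3 ▸ hin))))
    rcases List.mem_cons.1 hp with rfl | hp
    · exact h6 (Or.inr (Or.inr (Or.inr (Or.inl (pvSingle_infix.1 (e4 ▸ hin))))))
    rcases List.mem_cons.1 hp with rfl | hp
    · exact h6 (Or.inr (Or.inr (Or.inr (Or.inr (Or.inl (pvSingle_infix.1 (e5 ▸ hin)))))))
    rcases List.mem_cons.1 hp with rfl | hp
    · exact h6 (Or.inr (Or.inr (Or.inr (Or.inr (Or.inr (pvSingle_infix.1 (e6 ▸ hin)))))))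
    · simp at hp
  | false =>
    have hd : (['.', '.'] <:+: name.toList ∨ ['/', '/'] <:+: name.toList ∨
        ['\\', '\\'] <:+: name.toList ∨ '<' ∈ name.toList ∨ '>' ∈ name.toList ∨
        '|' ∈ name.toList) := by
      by_contra hno
      exact absurd ((pvClean_none_iff name.toList).2 hno) (by simp [hc])
    simp only [Bool.not_false]
    rw [List.any_eq_true]
    rcases hd with h | h | h | h | h | h
    · exact ⟨"..", by simp, by rw [PySem.Str.isIn_iff_infix, e1]; exact h⟩
    · exact ⟨"//", by simp, by rw [PySem.Str.isIn_iff_infix, e2]; exact h⟩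
    · exact ⟨"\\\\", by simp, by rw [PySem.Str.isIn_iff_infix, e3]; exact h⟩
    · exact ⟨"<", by simp, by rw [PySem.Str.isIn_iff_infix, e4]; exact (pvSingle_infix).2 h⟩
    · exact ⟨">", by simp, by rw [PySem.Str.isIn_iff_infix, e5]; exact (pvSingle_infix).2 h⟩
    · exact ⟨"|", by simp, by rw [PySem.Str.isIn_iff_infix, e6]; exact (pvSingle_infix).2 h⟩

-- ===== VERDICT (by name: the statement is the Claim_ definition above) =====
theorem is_valid_template_name_py_spec : Claim_equal_is_valid_template_name_py := by
  intro name _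
  unfold Spec_is_valid_template_name_py is_valid_template_name_py is_valid_template_name_py_alt
  cases hg : (PySem.Str.len name == 0 || PySem.Str.len name > 100) with
  | true => rfl
  | false =>
    simp only [Bool.false_eq_true, if_false]
    rw [pvAltLoop_eq, pvPatterns_eq]
    cases hA : name.toList.any (fun c => PySem.Chars.isalnum c) with
    | false => simp
    | true => cases hc : pvClean name.toList none <;> simp
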